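-- pv_equiv track=rewrite | github.com/vaughn-k/Algorithm | baakjoon/2020/bj2306.py | acgt
-- ===== SOURCE A (Python) =====
-- def acgt(arr,answer,s,e):
--     if(s >= e):
--         return 0
--     if(e-s == 1):
--         if(arr[s] == 'a' and arr[e] == 't'):
--             return 2
--         if(arr[s] == 'g' and arr[e] == 'c'):
--             return 2
--         else:
--             return 0
--     if(answer[s][e] != -1):
--         return answer[s][e]
--     a,t,g,c = -1,-1,-1,-1
--     st,sc = 0,0
--     for i in range(s,e+1):
--         if(a != -1 and g != -1):
--             break
--         if(a == -1 and arr[i] == 'a'):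
--             a = i
--         if(g == -1 and arr[i] == 'g'):
--             g = i
--     for i in range(s,e+1):
--         i = s+e-i
--         if(t != -1 and c != -1):
--             break
--         if(t == -1 and arr[i] == 't'):
--             t = i
--         if(c == -1 and arr[i] == 'c'):
--             c = i
--     tmp1,tmp2,tmp3,maximum = 0,0,0,0
--     if(a<t and a != -1 and t != -1):
--         tmp1 = 2 + acgt(arr,answer,a+1,t-1)
--     if(g<c and g != -1 and c != -1):
--         tmp2 = 2 + acgt(arr,answer,g+1,c-1)
--     for i in range(s,e):
--         tmp3 = acgt(arr,answer,s,i) + acgt(arr,answer,i+1,e)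
--         if(maximum < tmp3):
--             maximum = tmp3
--     maximum = max(maximum,tmp1,tmp2)
--     answer[s][e] = maximum
--     return maximum
-- ===== SOURCE B (Python) =====
-- def acgt(arr, answer, s, e):
--     # Bottom-up interval DP over a fresh table; 'answer' is only read (never
--     # mutated), so equivalence with the original is about the return value only.
--     if s >= e:
--         return 0
--
--     def base(p, q):
--         if arr[p] == 'a' and arr[q] == 't':
--             return 2
--         if arr[p] == 'g' and arr[q] == 'c':
--             return 2
--         return 0
--
--     if e - s == 1:
--         return base(s, e)
--
--     val = {}
--
--     def get(p, q):
--         if p >= q: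
--             return 0
--         if q - p == 1:
--             return base(p, q)
--         return val[(p, q)]
--
--     for L in range(2, e - s + 1):
--         for p in range(s, e - L + 1):
--             q = p + L
--             memo = answer[p][q]
--             if memo != -1:
--                 val[(p, q)] = memo
--                 continue
--             a = t = g = c = -1
--             for i in range(p, q + 1):
--                 if a != -1 and g != -1:
--                     break
--                 if a == -1 and arr[i] == 'a':
--                     a = i
--                 if g == -1 and arr[i] == 'g':
--                     g = i
--             for i in range(q, p - 1, -1):
--                 if t != -1 and c != -1:
--                     break
--                 if t == -1 and arr[i] == 't':
--                     t = i
--                 if c == -1 and arr[i] == 'c':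
--                     c = i
--             best = 0
--             for i in range(p, q):
--                 cur = get(p, i) + get(i + 1, q)
--                 if best < cur:
--                     best = cur
--             if a < t and a != -1 and t != -1:
--                 best = max(best, 2 + get(a + 1, t - 1))
--             if g < c and g != -1 and c != -1:
--                 best = max(best, 2 + get(g + 1, c - 1))
--             val[(p, q)] = best
--     return val[(s, e)]
-- ===== Notes on version B (the rewrite author's own statement) =====
-- stated objective: alternative
-- what changed: Replaces the top-down memoized recursion that mutates the caller's answer table with a bottom-up fill of a fresh dictionary over interval lengths 2..e-s (reading answer only for its pre-filled memo entries), so B performs no recursion and never mutates its arguments.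
-- outside the precondition, e.g. on acgt(['a', 'a', 'a', 'a'], [[-1, -1, 5, 8]], 0, 3): A returns 8, B raises IndexError
import Mathlib
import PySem

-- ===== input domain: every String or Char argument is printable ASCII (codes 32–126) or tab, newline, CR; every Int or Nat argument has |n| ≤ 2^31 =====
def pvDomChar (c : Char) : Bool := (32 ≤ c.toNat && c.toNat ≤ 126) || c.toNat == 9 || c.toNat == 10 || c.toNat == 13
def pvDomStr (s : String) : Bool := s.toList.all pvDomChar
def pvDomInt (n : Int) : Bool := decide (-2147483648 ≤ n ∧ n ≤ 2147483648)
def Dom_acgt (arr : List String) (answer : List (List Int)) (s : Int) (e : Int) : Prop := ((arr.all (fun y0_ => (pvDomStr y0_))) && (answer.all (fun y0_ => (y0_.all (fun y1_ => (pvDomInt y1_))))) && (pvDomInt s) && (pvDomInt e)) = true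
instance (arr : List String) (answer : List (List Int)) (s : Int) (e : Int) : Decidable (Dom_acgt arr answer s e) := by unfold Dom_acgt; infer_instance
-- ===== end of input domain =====

-- B re-implements the memoized top-down interval DP as a bottom-up table fill over a
-- fresh dictionary; A mutates `answer` in place while B only reads it, so the
-- equivalence proved here is about the RETURN value only.

-- ===== PORT A =====

-- the two length-1 base tests (shared verbatim by both Pythons)
def pvBase (arr : List String) (p q : Int) : Int :=
  let xp := (PySem.List.pyGet? arr p).getD ""
  let xq := (PySem.List.pyGet? arr q).getD ""
  if xp = "a" ∧ xq = "t" then 2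
  else if xp = "g" ∧ xq = "c" then 2
  else 0

-- forward scan `for i in range(s, e+1)` for the first 'a' / first 'g' (early break);
-- identical loop in both Pythons, fuel = number of remaining iterations
def pvScanAG (arr : List String) : Nat → Int → Int → Int → Int × Int
  | 0, _, a, g => (a, g)
  | n + 1, i, a, g =>
    if a ≠ -1 ∧ g ≠ -1 then (a, g)
    else
      let x := (PySem.List.pyGet? arr i).getD ""
      let a' := if a = -1 ∧ x = "a" then i else a
      let g' := if g = -1 ∧ x = "g" then i else g
      pvScanAG arr n (i + 1) a' g'

-- backward scan (i = s+e-i) for the last 't' / last 'c' (early break)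
def pvScanTC (arr : List String) : Nat → Int → Int → Int → Int × Int
  | 0, _, t, c => (t, c)
  | n + 1, i, t, c =>
    if t ≠ -1 ∧ c ≠ -1 then (t, c)
    else
      let x := (PySem.List.pyGet? arr i).getD ""
      let t' := if t = -1 ∧ x = "t" then i else t
      let c' := if c = -1 ∧ x = "c" then i else c
      pvScanTC arr n (i - 1) t' c'

-- answer[p][q] as an Option (none = index invalid, Python would raise there)
def pvGet2 (T : List (List Int)) (p q : Int) : Option Int :=
  (PySem.List.pyGet? T p).bind (fun row => PySem.List.pyGet? row q)

-- total read used by the ports (only reached on valid indices under Pre_)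
def pvMemoD (T : List (List Int)) (p q : Int) : Int := (pvGet2 T p q).getD (-1)

-- answer[p][q] = v (no-op where Python would raise, i.e. outside Pre_)
def pvSet2 (T : List (List Int)) (p q : Int) (v : Int) : List (List Int) :=
  match PySem.List.pyGet? T p with
  | none => T
  | some row => PySem.List.pySetD T p (PySem.List.pySetD row q v)

-- A's recursion, with the mutated memo table threaded through and a fuel bound
-- (fuel only makes the recursion structural; it is never exhausted when the
-- wrapper below supplies (e-s).toNat + 1)
def acgtA (arr : List String) : Nat → List (List Int) → Int → Int → List (List Int) × Int
  | 0, T, _, _ => (T, 0)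
  | n + 1, T, s, e =>
    if s ≥ e then (T, 0)
    else if e - s = 1 then (T, pvBase arr s e)
    else if pvMemoD T s e ≠ -1 then (T, pvMemoD T s e)
    else
      let ag := pvScanAG arr (e + 1 - s).toNat s (-1) (-1)
      let tc := pvScanTC arr (e + 1 - s).toNat e (-1) (-1)
      let r1 := if ag.1 < tc.1 ∧ ag.1 ≠ -1 ∧ tc.1 ≠ -1 then
          let u := acgtA arr n T (ag.1 + 1) (tc.1 - 1); (u.1, 2 + u.2)
        else (T, 0)
      let r2 := if ag.2 < tc.2 ∧ ag.2 ≠ -1 ∧ tc.2 ≠ -1 then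
          let u := acgtA arr n r1.1 (ag.2 + 1) (tc.2 - 1); (u.1, 2 + u.2)
        else (r1.1, 0)
      let loop := (PySem.List.pyRange s e 1).foldl
        (fun (st : List (List Int) × Int) i =>
          let u1 := acgtA arr n st.1 s i
          let u2 := acgtA arr n u1.1 (i + 1) e
          let t3 := u1.2 + u2.2
          (u2.1, if st.2 < t3 then t3 else st.2))
        (r2.1, 0)
      let m := max (max loop.2 r1.2) r2.2
      (pvSet2 loop.1 s e m, m)

def acgt (arr : List String) (answer : List (List Int)) (s : Int) (e : Int) : Int :=
  (acgtA arr ((e - s).toNat + 1) answer s e).2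

-- ===== PORT B =====

-- Source B's `get(p, q)`: base cases inline, longer intervals from the fresh table
def pvGetSub (arr : List String) (d : PySem.Dict (Int × Int) Int) (p q : Int) : Int :=
  if p ≥ q then 0
  else if q - p = 1 then pvBase arr p q
  else (PySem.Dict.get? d (p, q)).getD 0

-- Source B's loop body for one cell (p, q), q - p ≥ 2
def pvFillCell (arr : List String) (answer : List (List Int))
    (d : PySem.Dict (Int × Int) Int) (p q : Int) : Int :=
  let memo := pvMemoD answer p q
  if memo ≠ -1 then memo
  else
    let ag := pvScanAG arr (q + 1 - p).toNat p (-1) (-1)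
    let tc := pvScanTC arr (q + 1 - p).toNat q (-1) (-1)
    let best := (PySem.List.pyRange p q 1).foldl
      (fun b i =>
        let cur := pvGetSub arr d p i + pvGetSub arr d (i + 1) q
        if b < cur then cur else b) 0
    let b1 := if ag.1 < tc.1 ∧ ag.1 ≠ -1 ∧ tc.1 ≠ -1 then
        max best (2 + pvGetSub arr d (ag.1 + 1) (tc.1 - 1)) else best
    if ag.2 < tc.2 ∧ ag.2 ≠ -1 ∧ tc.2 ≠ -1 then
      max b1 (2 + pvGetSub arr d (ag.2 + 1) (tc.2 - 1)) else b1

def acgt_alt (arr : List String) (answer : List (List Int)) (s : Int) (e : Int) : Int :=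
  if s ≥ e then 0
  else if e - s = 1 then pvBase arr s e
  else
    let d := (PySem.List.pyRange 2 (e - s + 1) 1).foldl
      (fun d L => (PySem.List.pyRange s (e - L + 1) 1).foldl
        (fun d p => PySem.Dict.insert d (p, p + L) (pvFillCell arr answer d p (p + L))) d)
      PySem.Dict.empty
    (PySem.Dict.get? d (s, e)).getD 0

-- ===== PRECONDITION & SPEC =====
-- Pre_ excludes the inputs on which A's index accesses raise IndexError; because
-- pre-filled memo entries can cut those accesses short, the bounds are required for
-- the whole interval [s,e], which conservatively also excludes some early memo-hit
-- inputs on which A returns; and for the recursive case (e-s ≥ 2) it requires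
-- 0 ≤ s, because with a negative start Python's negative-index wraparound makes
-- distinct sub-intervals share a memo cell and A's value there is an accident of
-- its write order that no caller would specify.
def Pre_acgt (arr : List String) (answer : List (List Int)) (s : Int) (e : Int) : Prop :=
  s ≥ e
  ∨ (e - s = 1 ∧ -(arr.length : Int) ≤ s ∧ s < arr.length ∧ -(arr.length : Int) ≤ e ∧ e < arr.length)
  ∨ (2 ≤ e - s ∧ 0 ≤ s ∧ e < arr.length ∧ e < answer.length ∧
      ∀ p ∈ PySem.List.pyRange s (e + 1) 1,
        e < (((PySem.List.pyGet? answer p).getD []).length : Int))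

instance (arr : List String) (answer : List (List Int)) (s : Int) (e : Int) : Decidable (Pre_acgt arr answer s e) := by
  unfold Pre_acgt; infer_instance

def pvWitness_acgt : List String × List (List Int) × Int × Int :=
  (["a", "g", "c", "t"], [[-1, -1, -1, -1], [-1, -1, -1, -1], [-1, -1, -1, -1], [-1, -1, -1, -1]], 0, 3)

def Spec_acgt (arr : List String) (answer : List (List Int)) (s : Int) (e : Int) (out : Int) : Prop := out = acgt_alt arr answer s e
instance (arr : List String) (answer : List (List Int)) (s : Int) (e : Int) (out : Int) : Decidable (Spec_acgt arr answer s e out) := by unfold Spec_acgt; infer_instance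

-- ===== CLAIM (what is proved, stated in full; the proofs are below) =====
def Claim_equal_acgt : Prop := ∀ (arr : List String) (answer : List (List Int)) (s : Int) (e : Int), Dom_acgt arr answer s e → Pre_acgt arr answer s e → Spec_acgt arr answer s e (acgt arr answer s e)

-- ===== LEMMAS AND PROOFS =====

-- one unfolding step of the shared interval-value recurrence, with the recursive
-- occurrences abstracted as W
def pvStep (arr : List String) (A0 : List (List Int)) (W : Int → Int → Int) (s e : Int) : Int :=
  if s ≥ e then 0
  else if e - s = 1 then pvBase arr s e
  else if pvMemoD A0 s e ≠ -1 then pvMemoD A0 s e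
  else
    let ag := pvScanAG arr (e + 1 - s).toNat s (-1) (-1)
    let tc := pvScanTC arr (e + 1 - s).toNat e (-1) (-1)
    let t1 := if ag.1 < tc.1 ∧ ag.1 ≠ -1 ∧ tc.1 ≠ -1 then 2 + W (ag.1 + 1) (tc.1 - 1) else 0
    let t2 := if ag.2 < tc.2 ∧ ag.2 ≠ -1 ∧ tc.2 ≠ -1 then 2 + W (ag.2 + 1) (tc.2 - 1) else 0
    let m := (PySem.List.pyRange s e 1).foldl
      (fun m i =>
        let t3 := W s i + W (i + 1) e
        if m < t3 then t3 else m) 0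
    max (max m t1) t2

-- the per-interval value both programs compute: pure recursion on the ORIGINAL table
def pvVf (arr : List String) (A0 : List (List Int)) : Nat → Int → Int → Int
  | 0, _, _ => 0
  | n + 1, s, e => pvStep arr A0 (pvVf arr A0 n) s e

def pvV (arr : List String) (A0 : List (List Int)) (s e : Int) : Int :=
  pvVf arr A0 ((e - s).toNat + 1) s e

theorem pvBase_nonneg (arr : List String) (p q : Int) : 0 ≤ pvBase arr p q := by
  unfold pvBase; dsimp only; split_ifs <;> omega

theorem pvFold_ge (l : List Int) (g : Int → Int) (init : Int) :
    init ≤ l.foldl (fun m i => if m < g i then g i else m) init := by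
  have h : l.foldl (fun m i => if m < g i then g i else m) init
      = l.foldl (fun m i => max m (g i)) init := by
    apply PySem.List.foldl_congr_mem
    intro acc x _
    split_ifs with h <;> omega
  rw [h]; exact (PySem.List.le_foldl_max_int l g init).1

theorem pvScanAG_bound (arr : List String) : ∀ (n : Nat) (i a g : Int),
    ((pvScanAG arr n i a g).1 = a ∨ (i ≤ (pvScanAG arr n i a g).1 ∧ (pvScanAG arr n i a g).1 < i + n)) ∧
    ((pvScanAG arr n i a g).2 = g ∨ (i ≤ (pvScanAG arr n i a g).2 ∧ (pvScanAG arr n i a g).2 < i + n)) := by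
  intro n
  induction n with
  | zero => intro i a g; simp [pvScanAG]
  | succ n ih =>
    intro i a g
    rw [pvScanAG]
    split_ifs with h
    · simp
    · dsimp only
      rcases ih (i + 1) (if a = -1 ∧ (PySem.List.pyGet? arr i).getD "" = "a" then i else a)
        (if g = -1 ∧ (PySem.List.pyGet? arr i).getD "" = "g" then i else g) with ⟨ha, hg⟩
      constructor
      · rcases ha with ha | ha
        · rw [ha]; split_ifs with h1
          · right; push_cast; omega
          · left; rfl
        · right; push_cast at ha ⊢; omega
      · rcases hg with hg | hg
        · rw [hg]; split_ifs with h1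
          · right; push_cast; omega
          · left; rfl
        · right; push_cast at hg ⊢; omega

theorem pvScanTC_bound (arr : List String) : ∀ (n : Nat) (i t c : Int),
    ((pvScanTC arr n i t c).1 = t ∨ (i - n < (pvScanTC arr n i t c).1 ∧ (pvScanTC arr n i t c).1 ≤ i)) ∧
    ((pvScanTC arr n i t c).2 = c ∨ (i - n < (pvScanTC arr n i t c).2 ∧ (pvScanTC arr n i t c).2 ≤ i)) := by
  intro n
  induction n with
  | zero => intro i t c; simp [pvScanTC]
  | succ n ih =>
    intro i t c
    rw [pvScanTC]
    split_ifs with h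
    · simp
    · dsimp only
      rcases ih (i - 1) (if t = -1 ∧ (PySem.List.pyGet? arr i).getD "" = "t" then i else t)
        (if c = -1 ∧ (PySem.List.pyGet? arr i).getD "" = "c" then i else c) with ⟨ht, hc⟩
      constructor
      · rcases ht with ht | ht
        · rw [ht]; split_ifs with h1
          · right; push_cast; omega
          · left; rfl
        · right; push_cast at ht ⊢; omega
      · rcases hc with hc | hc
        · rw [hc]; split_ifs with h1
          · right; push_cast; omega
          · left; rfl
        · right; push_cast at hc ⊢; omega

-- the positions pvStep consults W at, with the bounds the scans guarantee
theorem pvStep_congr (arr : List String) (A0 : List (List Int)) (W1 W2 : Int → Int → Int)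
    (s e : Int)
    (h : ∀ p q : Int, s ≤ p → q ≤ e → (q - p).toNat < (e - s).toNat → W1 p q = W2 p q) :
    pvStep arr A0 W1 s e = pvStep arr A0 W2 s e := by
  unfold pvStep
  split_ifs with h1 h2 h3
  · rfl
  · rfl
  · rfl
  · dsimp only
    have hle : 2 ≤ e - s := by omega
    have hag := pvScanAG_bound arr (e + 1 - s).toNat s (-1) (-1)
    have htc := pvScanTC_bound arr (e + 1 - s).toNat e (-1) (-1)
    set A := pvScanAG arr (e + 1 - s).toNat s (-1) (-1) with hA
    set C := pvScanTC arr (e + 1 - s).toNat e (-1) (-1) with hC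
    have e1 : (if A.1 < C.1 ∧ A.1 ≠ -1 ∧ C.1 ≠ -1 then 2 + W1 (A.1 + 1) (C.1 - 1) else 0)
        = (if A.1 < C.1 ∧ A.1 ≠ -1 ∧ C.1 ≠ -1 then 2 + W2 (A.1 + 1) (C.1 - 1) else 0) := by
      split_ifs with hg
      · obtain ⟨hg1, hg2, hg3⟩ := hg
        rcases hag.1 with ha | ha
        · exact absurd ha hg2
        rcases htc.1 with ht | ht
        · exact absurd ht hg3
        rw [h _ _ (by omega) (by omega) (by omega)]
      · rfl
    have e2 : (if A.2 < C.2 ∧ A.2 ≠ -1 ∧ C.2 ≠ -1 then 2 + W1 (A.2 + 1) (C.2 - 1) else 0)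
        = (if A.2 < C.2 ∧ A.2 ≠ -1 ∧ C.2 ≠ -1 then 2 + W2 (A.2 + 1) (C.2 - 1) else 0) := by
      split_ifs with hg
      · obtain ⟨hg1, hg2, hg3⟩ := hg
        rcases hag.2 with ha | ha
        · exact absurd ha hg2
        rcases htc.2 with ht | ht
        · exact absurd ht hg3
        rw [h _ _ (by omega) (by omega) (by omega)]
      · rfl
    have e3 : (PySem.List.pyRange s e 1).foldl
          (fun m i => if m < W1 s i + W1 (i + 1) e then W1 s i + W1 (i + 1) e else m) 0
        = (PySem.List.pyRange s e 1).foldl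
          (fun m i => if m < W2 s i + W2 (i + 1) e then W2 s i + W2 (i + 1) e else m) 0 := by
      apply PySem.List.foldl_congr_mem
      intro acc i hi
      rw [PySem.List.mem_pyRange_one] at hi
      rw [h s i le_rfl (by omega) (by omega), h (i + 1) e (by omega) le_rfl (by omega)]
    rw [e1, e2, e3]

theorem pvVf_ne_neg_one (arr : List String) (A0 : List (List Int)) : ∀ (n : Nat) (s e : Int),
    pvVf arr A0 n s e ≠ -1 := by
  intro n s e
  cases n with
  | zero => simp [pvVf]
  | succ n =>
    rw [pvVf, pvStep]
    split_ifs with h1 h2 h3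
    · omega
    · have := pvBase_nonneg arr s e; omega
    · exact h3
    · dsimp only
      have := pvFold_ge (PySem.List.pyRange s e 1)
        (fun i => pvVf arr A0 n s i + pvVf arr A0 n (i + 1) e) 0
      omega

theorem pvV_ne_neg_one (arr : List String) (A0 : List (List Int)) (s e : Int) :
    pvV arr A0 s e ≠ -1 := pvVf_ne_neg_one arr A0 _ s e

theorem pvVf_irrel (arr : List String) (A0 : List (List Int)) : ∀ (n m : Nat) (s e : Int),
    (e - s).toNat < n → (e - s).toNat < m → pvVf arr A0 n s e = pvVf arr A0 m s e := by
  intro n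
  induction n with
  | zero => intro m s e h; omega
  | succ n ih =>
    intro m s e hn hm
    cases m with
    | zero => omega
    | succ m =>
      rw [pvVf, pvVf]
      exact pvStep_congr arr A0 _ _ s e
        (fun p q hp hq hlt => ih m p q (by omega) (by omega))

theorem pvVf_eq_V (arr : List String) (A0 : List (List Int)) (n : Nat) (s e : Int)
    (h : (e - s).toNat < n) : pvVf arr A0 n s e = pvV arr A0 s e :=
  pvVf_irrel arr A0 n ((e - s).toNat + 1) s e h (by omega)

-- the recurrence pvV satisfies (the canonical unfolding both proofs rewrite to)
theorem pvV_rec (arr : List String) (A0 : List (List Int)) (s e : Int) :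
    pvV arr A0 s e = pvStep arr A0 (pvV arr A0) s e := by
  rw [pvV, pvVf]
  exact pvStep_congr arr A0 _ _ s e
    (fun p q hp hq hlt => pvVf_eq_V arr A0 _ p q (by omega))

-- ---- B side: the bottom-up fill computes pvV ----

-- coverage of the fresh table: all cells of length < L inside [s,e] hold pvV
def pvCovB (arr : List String) (A0 : List (List Int)) (s e : Int)
    (d : PySem.Dict (Int × Int) Int) (L : Int) : Prop :=
  ∀ p q : Int, s ≤ p → q ≤ e → 2 ≤ q - p → q - p < L →
    PySem.Dict.get? d (p, q) = some (pvV arr A0 p q)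

theorem pvCovB_mono (arr : List String) (A0 : List (List Int)) (s e : Int)
    (d : PySem.Dict (Int × Int) Int) (L L' : Int) (h : L' ≤ L)
    (hc : pvCovB arr A0 s e d L) : pvCovB arr A0 s e d L' :=
  fun p q hp hq h2 hl => hc p q hp hq h2 (by omega)

theorem pvV_ge (arr : List String) (A0 : List (List Int)) (s e : Int) (h : s ≥ e) :
    pvV arr A0 s e = 0 := by
  rw [pvV_rec, pvStep]; simp [h]

theorem pvV_one (arr : List String) (A0 : List (List Int)) (s e : Int) (h : e - s = 1) :
    pvV arr A0 s e = pvBase arr s e := by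
  rw [pvV_rec, pvStep]
  have h' : ¬ s ≥ e := by omega
  simp [h, h']

theorem pvGetSub_eq (arr : List String) (A0 : List (List Int)) (s e : Int)
    (d : PySem.Dict (Int × Int) Int) (L : Int) (hcov : pvCovB arr A0 s e d L)
    (p q : Int) (hp : s ≤ p) (hq : q ≤ e) (hlt : q - p < L) :
    pvGetSub arr d p q = pvV arr A0 p q := by
  unfold pvGetSub
  split_ifs with h1 h2
  · rw [pvV_ge arr A0 p q h1]
  · rw [pvV_one arr A0 p q h2]
  · rw [hcov p q hp hq (by omega) hlt]
    rfl

theorem pvFillCell_eq (arr : List String) (A0 : List (List Int)) (s e : Int)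
    (d : PySem.Dict (Int × Int) Int) (p q : Int)
    (h2 : 2 ≤ q - p) (hp : s ≤ p) (hq : q ≤ e)
    (hcov : pvCovB arr A0 s e d (q - p)) :
    pvFillCell arr A0 d p q = pvV arr A0 p q := by
  have hnp : ¬ p ≥ q := by omega
  have hne : ¬ q - p = 1 := by omega
  rw [pvV_rec, pvStep]
  unfold pvFillCell
  by_cases hm : pvMemoD A0 p q ≠ -1
  · simp [hnp, hne, hm]
  · simp only [if_neg hnp, if_neg hne, if_neg hm]
    have hag := pvScanAG_bound arr (q + 1 - p).toNat p (-1) (-1)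
    have htc := pvScanTC_bound arr (q + 1 - p).toNat q (-1) (-1)
    set A := pvScanAG arr (q + 1 - p).toNat p (-1) (-1) with hA
    set C := pvScanTC arr (q + 1 - p).toNat q (-1) (-1) with hC
    have hget : ∀ p' q' : Int, s ≤ p' → q' ≤ e → q' - p' < q - p →
        pvGetSub arr d p' q' = pvV arr A0 p' q' :=
      fun p' q' a b c => pvGetSub_eq arr A0 s e d (q - p) hcov p' q' a b c
    have ebest : (PySem.List.pyRange p q 1).foldl
          (fun b i =>
            let cur := pvGetSub arr d p i + pvGetSub arr d (i + 1) q
            if b < cur then cur else b) 0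
        = (PySem.List.pyRange p q 1).foldl
          (fun m i =>
            let t3 := pvV arr A0 p i + pvV arr A0 (i + 1) q
            if m < t3 then t3 else m) 0 := by
      apply PySem.List.foldl_congr_mem
      intro acc i hi
      rw [PySem.List.mem_pyRange_one] at hi
      rw [hget p i hp (by omega) (by omega), hget (i + 1) q (by omega) hq (by omega)]
    rw [ebest]
    have hbge : (0 : Int) ≤ (PySem.List.pyRange p q 1).foldl
        (fun m i =>
          let t3 := pvV arr A0 p i + pvV arr A0 (i + 1) q
          if m < t3 then t3 else m) 0 :=
      pvFold_ge (PySem.List.pyRange p q 1) (fun i => pvV arr A0 p i + pvV arr A0 (i + 1) q) 0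
    set m := (PySem.List.pyRange p q 1).foldl
        (fun m i =>
          let t3 := pvV arr A0 p i + pvV arr A0 (i + 1) q
          if m < t3 then t3 else m) 0 with hmdef
    by_cases hg1 : A.1 < C.1 ∧ A.1 ≠ -1 ∧ C.1 ≠ -1 <;>
      by_cases hg2 : A.2 < C.2 ∧ A.2 ≠ -1 ∧ C.2 ≠ -1
    · obtain ⟨h11, h12, h13⟩ := id hg1
      obtain ⟨h21, h22, h23⟩ := id hg2
      rcases hag.1 with hb1 | hb1; · exact absurd hb1 h12
      rcases htc.1 with hb2 | hb2; · exact absurd hb2 h13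
      rcases hag.2 with hb3 | hb3; · exact absurd hb3 h22
      rcases htc.2 with hb4 | hb4; · exact absurd hb4 h23
      rw [if_pos hg1, if_pos hg2, if_pos ⟨h11, h12, h13⟩, if_pos ⟨h21, h22, h23⟩,
        hget (A.1 + 1) (C.1 - 1) (by omega) (by omega) (by omega),
        hget (A.2 + 1) (C.2 - 1) (by omega) (by omega) (by omega)]
    · obtain ⟨h11, h12, h13⟩ := id hg1
      rcases hag.1 with hb1 | hb1; · exact absurd hb1 h12
      rcases htc.1 with hb2 | hb2; · exact absurd hb2 h13
      rw [if_pos hg1, if_neg hg2, if_pos ⟨h11, h12, h13⟩, if_neg hg2,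
        hget (A.1 + 1) (C.1 - 1) (by omega) (by omega) (by omega)]
      omega
    · obtain ⟨h21, h22, h23⟩ := id hg2
      rcases hag.2 with hb3 | hb3; · exact absurd hb3 h22
      rcases htc.2 with hb4 | hb4; · exact absurd hb4 h23
      rw [if_neg hg1, if_pos hg2, if_neg hg1, if_pos ⟨h21, h22, h23⟩,
        hget (A.2 + 1) (C.2 - 1) (by omega) (by omega) (by omega)]
      omega
    · rw [if_neg hg1, if_neg hg2, if_neg hg1, if_neg hg2]
      omega

theorem pvInner (arr : List String) (A0 : List (List Int)) (s e L : Int)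
    (h2 : 2 ≤ L) (_hLe : L ≤ e - s) :
    ∀ (k : Nat) (p0 : Int) (d : PySem.Dict (Int × Int) Int), s ≤ p0 →
      e - L + 1 - p0 ≤ k →
      pvCovB arr A0 s e d L →
      (∀ p : Int, s ≤ p → p < p0 → PySem.Dict.get? d (p, p + L) = some (pvV arr A0 p (p + L))) →
      pvCovB arr A0 s e
        ((PySem.List.pyRange p0 (e - L + 1) 1).foldl
          (fun d p => PySem.Dict.insert d (p, p + L) (pvFillCell arr A0 d p (p + L))) d)
        (L + 1) := by
  intro k
  induction k with
  | zero =>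
    intro p0 d hp0 hk hcov hrow
    rw [PySem.List.pyRange_one_eq_nil (by omega)]
    intro p q hp hq hq2 hqL
    rcases lt_or_ge (q - p) L with h | h
    · exact hcov p q hp hq hq2 h
    · have hqe : q = p + L := by omega
      subst hqe
      exact hrow p hp (by omega)
  | succ k ih =>
    intro p0 d hp0 hk hcov hrow
    rcases lt_or_ge p0 (e - L + 1) with hlt | hge
    · rw [PySem.List.pyRange_one_cons hlt]
      simp only [List.foldl_cons]
      have hfc : pvFillCell arr A0 d p0 (p0 + L) = pvV arr A0 p0 (p0 + L) := by
        apply pvFillCell_eq arr A0 s e d p0 (p0 + L) (by omega) hp0 (by omega)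
        have : p0 + L - p0 = L := by omega
        rw [this]; exact hcov
      apply ih (p0 + 1) _ (by omega) (by omega)
      · intro p q hp hq hq2 hqL
        rw [PySem.Dict.get?_insert_of_ne]
        · exact hcov p q hp hq hq2 hqL
        · intro hkey
          have h1 : p = p0 := congrArg Prod.fst hkey
          have h2' : q = p0 + L := congrArg Prod.snd hkey
          omega
      · intro p hp hpl
        rcases lt_or_ge p p0 with hlt' | hge'
        · rw [PySem.Dict.get?_insert_of_ne]
          · exact hrow p hp hlt'
          · intro hkey
            have h1 : p = p0 := congrArg Prod.fst hkey
            omega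
        · have hpp : p = p0 := by omega
          subst hpp
          rw [PySem.Dict.get?_insert_self, hfc]
    · rw [PySem.List.pyRange_one_eq_nil (by omega)]
      intro p q hp hq hq2 hqL
      rcases lt_or_ge (q - p) L with h | h
      · exact hcov p q hp hq hq2 h
      · have hqe : q = p + L := by omega
        subst hqe
        exact hrow p hp (by omega)

theorem pvOuter (arr : List String) (A0 : List (List Int)) (s e : Int) :
    ∀ (k : Nat) (L : Int) (d : PySem.Dict (Int × Int) Int), 2 ≤ L →
      e - s + 1 - L ≤ k → pvCovB arr A0 s e d L →
      pvCovB arr A0 s e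
        ((PySem.List.pyRange L (e - s + 1) 1).foldl
          (fun d L' => (PySem.List.pyRange s (e - L' + 1) 1).foldl
            (fun d p => PySem.Dict.insert d (p, p + L') (pvFillCell arr A0 d p (p + L'))) d) d)
        (e - s + 1) := by
  intro k
  induction k with
  | zero =>
    intro L d h2 hk hcov
    rw [PySem.List.pyRange_one_eq_nil (by omega)]
    exact pvCovB_mono arr A0 s e d L (e - s + 1) (by omega) hcov
  | succ k ih =>
    intro L d h2 hk hcov
    rcases lt_or_ge L (e - s + 1) with hlt | hge
    · rw [PySem.List.pyRange_one_cons hlt]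
      simp only [List.foldl_cons]
      apply ih (L + 1) _ (by omega) (by omega)
      exact pvInner arr A0 s e L h2 (by omega) (e - L + 1 - s).toNat s d le_rfl (by omega)
        hcov (fun p hp hplt => absurd hp (by omega))
    · rw [PySem.List.pyRange_one_eq_nil (by omega)]
      exact pvCovB_mono arr A0 s e d L (e - s + 1) (by omega) hcov

theorem pv_alt_eq_V (arr : List String) (A0 : List (List Int)) (s e : Int) :
    acgt_alt arr A0 s e = pvV arr A0 s e := by
  unfold acgt_alt
  split_ifs with h1 h2
  · rw [pvV_ge arr A0 s e h1]
  · rw [pvV_one arr A0 s e h2]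
  · have h2' : 2 ≤ e - s := by omega
    have hcov := pvOuter arr A0 s e (e - s + 1 - 2).toNat 2 PySem.Dict.empty (by omega)
      (by omega) (fun p q hp hq hq2 hqL => by omega)
    have hfin := hcov s e le_rfl le_rfl h2' (by omega)
    show (Option.getD (PySem.Dict.get? _ (s, e)) 0) = pvV arr A0 s e
    rw [hfin]
    rfl

-- ---- A side: the threaded memo table stays consistent with pvV ----

-- every (nonnegative-index) cell of T is either untouched or holds the pvV value of
-- a cell whose original entry was the -1 sentinel
def pvInv (arr : List String) (A0 T : List (List Int)) : Prop :=
  ∀ p q : Int, 0 ≤ p → 0 ≤ q →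
    (pvGet2 T p q = pvGet2 A0 p q ∨
      (pvGet2 A0 p q = some (-1) ∧ pvGet2 T p q = some (pvV arr A0 p q)))

theorem pvGet2_set2 (T : List (List Int)) (p q v p' q' : Int)
    (hp : 0 ≤ p) (hq : 0 ≤ q) (hp' : 0 ≤ p') (hq' : 0 ≤ q') :
    pvGet2 (pvSet2 T p q v) p' q' =
      if p' = p ∧ q' = q ∧ (pvGet2 T p q).isSome then some v else pvGet2 T p' q' := by
  unfold pvSet2
  cases hrow : PySem.List.pyGet? T p with
  | none =>
    have h0 : pvGet2 T p q = none := by unfold pvGet2; rw [hrow]; rfl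
    simp [h0]
  | some row =>
    have hTrow : T[p.toNat]? = some row := by
      rw [← PySem.List.pyGet?_of_nonneg T hp]; exact hrow
    have hplen : p.toNat < T.length := by
      rcases List.getElem?_eq_some_iff.mp hTrow with ⟨h, _⟩; exact h
    have hT2 : ∀ r : Int, 0 ≤ r → pvGet2 T p r = row[r.toNat]? := by
      intro r hr; unfold pvGet2; rw [hrow]; exact PySem.List.pyGet?_of_nonneg row hr
    have hL : PySem.List.pySetD T p (PySem.List.pySetD row q v) = T.set p.toNat (row.set q.toNat v) := by
      rw [PySem.List.pySetD_of_nonneg row v hq, PySem.List.pySetD_of_nonneg T _ hp]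
    dsimp only
    rw [hL]
    by_cases hpp : p' = p
    · subst hpp
      have hgl : pvGet2 (T.set p'.toNat (row.set q.toNat v)) p' q' = (row.set q.toNat v)[q'.toNat]? := by
        unfold pvGet2
        rw [PySem.List.pyGet?_of_nonneg _ hp', List.getElem?_set, if_pos rfl, if_pos hplen,
          Option.bind_some, PySem.List.pyGet?_of_nonneg _ hq']
      rw [hgl]
      by_cases hqq : q' = q
      · subst hqq
        rw [List.getElem?_set, if_pos rfl]
        by_cases hqlen : q'.toNat < row.length
        · rw [if_pos hqlen,
            if_pos (⟨rfl, rfl, by rw [hT2 q' hq', List.getElem?_eq_getElem hqlen]; rfl⟩ :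
              p' = p' ∧ q' = q' ∧ (pvGet2 T p' q').isSome = true)]
        · rw [if_neg hqlen]
          have hnone : row[q'.toNat]? = none := List.getElem?_eq_none_iff.mpr (by omega)
          rw [if_neg (fun hcon => by
              have := hcon.2.2
              rw [hT2 q' hq', hnone] at this
              simp at this),
            hT2 q' hq', hnone]
      · have hne : q.toNat ≠ q'.toNat := by omega
        rw [List.getElem?_set, if_neg hne, if_neg (fun hcon => hqq hcon.2.1), hT2 q' hq']
    · have hne : p.toNat ≠ p'.toNat := by omega
      have hgl : pvGet2 (T.set p.toNat (row.set q.toNat v)) p' q' = pvGet2 T p' q' := by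
        unfold pvGet2
        rw [PySem.List.pyGet?_of_nonneg _ hp', List.getElem?_set, if_neg hne,
          ← PySem.List.pyGet?_of_nonneg T hp']
      rw [hgl, if_neg (fun hcon => hpp hcon.1)]

-- writing the true value at a missed cell preserves the invariant
theorem pvInv_set2 (arr : List String) (A0 T : List (List Int)) (s e : Int)
    (hs : 0 ≤ s) (he : 0 ≤ e) (hInv : pvInv arr A0 T)
    (hA0 : pvMemoD A0 s e = -1) :
    pvInv arr A0 (pvSet2 T s e (pvV arr A0 s e)) := by
  intro p q hp hq
  rw [pvGet2_set2 T s e _ p q hs he hp hq]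
  split_ifs with hc
  · obtain ⟨hps, hqe, hsome⟩ := hc
    subst hps; subst hqe
    right
    refine ⟨?_, rfl⟩
    rcases hInv p q hp hq with h | h
    · rw [← h]
      cases hTv : pvGet2 T p q with
      | none => rw [hTv] at hsome; exact absurd hsome (by simp)
      | some w =>
        have hw : w = -1 := by
          unfold pvMemoD at hA0; rw [← h, hTv] at hA0; exact hA0
        rw [hw]
    · exact h.1
  · exact hInv p q hp hq

-- the split-point loop, threaded table on the left, pure values on the right
theorem pvLoop_eq (arr : List String) (A0 : List (List Int)) (n : Nat) (s e : Int)
    (hs : 0 ≤ s) (h2' : 2 ≤ e - s) (hfe : (e - s).toNat ≤ n)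
    (ih : ∀ (s' e' : Int) (T' : List (List Int)), (e' - s').toNat < n → 0 ≤ s' → pvInv arr A0 T' →
      (acgtA arr n T' s' e').2 = pvV arr A0 s' e' ∧ pvInv arr A0 (acgtA arr n T' s' e').1) :
    ∀ (l : List Int), (∀ i ∈ l, s ≤ i ∧ i < e) → ∀ (T0 : List (List Int)) (m0 : Int),
      pvInv arr A0 T0 →
      ((l.foldl (fun (st : List (List Int) × Int) i =>
          let u1 := acgtA arr n st.1 s i
          let u2 := acgtA arr n u1.1 (i + 1) e
          let t3 := u1.2 + u2.2
          (u2.1, if st.2 < t3 then t3 else st.2)) (T0, m0)).2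
        = l.foldl (fun m i =>
            let t3 := pvV arr A0 s i + pvV arr A0 (i + 1) e
            if m < t3 then t3 else m) m0) ∧
      pvInv arr A0 ((l.foldl (fun (st : List (List Int) × Int) i =>
          let u1 := acgtA arr n st.1 s i
          let u2 := acgtA arr n u1.1 (i + 1) e
          let t3 := u1.2 + u2.2
          (u2.1, if st.2 < t3 then t3 else st.2)) (T0, m0)).1) := by
  intro l
  induction l with
  | nil => intro _ T0 m0 hInv0; exact ⟨rfl, hInv0⟩
  | cons i l ihl =>
    intro hmem T0 m0 hInv0
    have hi : s ≤ i ∧ i < e := hmem i (List.mem_cons_self)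
    have h1 := ih s i T0 (by omega) hs hInv0
    have h2 := ih (i + 1) e (acgtA arr n T0 s i).1 (by omega) (by omega) h1.2
    simp only [List.foldl_cons]
    rw [h1.1, h2.1]
    exact ihl (fun j hj => hmem j (List.mem_cons_of_mem i hj))
      (acgtA arr n (acgtA arr n T0 s i).1 (i + 1) e).1
      (if m0 < pvV arr A0 s i + pvV arr A0 (i + 1) e
        then pvV arr A0 s i + pvV arr A0 (i + 1) e else m0) h2.2

-- the central simulation: with enough fuel and a consistent table, A's recursion
-- returns pvV and keeps the table consistent
theorem pvAcgtA_eq (arr : List String) (A0 : List (List Int)) :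
    ∀ (n : Nat) (s e : Int) (T : List (List Int)),
      (e - s).toNat < n → 0 ≤ s → pvInv arr A0 T →
      (acgtA arr n T s e).2 = pvV arr A0 s e ∧ pvInv arr A0 (acgtA arr n T s e).1 := by
  intro n
  induction n with
  | zero => intro s e T h; omega
  | succ n ih =>
    intro s e T hfuel hs hInv
    rw [acgtA]
    by_cases h1 : s ≥ e
    · simp only [if_pos h1]
      exact ⟨(pvV_ge arr A0 s e h1).symm, hInv⟩
    by_cases h2 : e - s = 1
    · simp only [if_neg h1, if_pos h2]
      exact ⟨(pvV_one arr A0 s e h2).symm, hInv⟩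
    have he : 0 ≤ e := by omega
    have h2' : 2 ≤ e - s := by omega
    by_cases h3 : pvMemoD T s e ≠ -1
    · simp only [if_neg h1, if_neg h2, if_pos h3]
      refine ⟨?_, hInv⟩
      rcases hInv s e hs he with h | h
      · -- untouched cell: A0's memo test fires with the same value
        have hA0 : pvMemoD A0 s e ≠ -1 := by
          unfold pvMemoD at h3 ⊢; rw [← h]; exact h3
        rw [pvV_rec, pvStep, if_neg h1, if_neg h2, if_pos hA0]
        unfold pvMemoD; rw [h]
      · unfold pvMemoD; rw [h.2]; rfl
    · simp only [if_neg h1, if_neg h2, if_neg h3]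
      have h3 : pvMemoD T s e = -1 := not_not.mp h3
      have hA0miss : pvMemoD A0 s e = -1 := by
        rcases hInv s e hs he with h | h
        · unfold pvMemoD at h3 ⊢; rw [← h]; exact h3
        · exfalso
          have : pvMemoD T s e = pvV arr A0 s e := by unfold pvMemoD; rw [h.2]; rfl
          exact pvV_ne_neg_one arr A0 s e (by rw [← this]; exact h3)
      have hag := pvScanAG_bound arr (e + 1 - s).toNat s (-1) (-1)
      have htc := pvScanTC_bound arr (e + 1 - s).toNat e (-1) (-1)
      set A := pvScanAG arr (e + 1 - s).toNat s (-1) (-1) with hA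
      set C := pvScanTC arr (e + 1 - s).toNat e (-1) (-1) with hC
      set R1 := (if A.1 < C.1 ∧ A.1 ≠ -1 ∧ C.1 ≠ -1 then
          ((acgtA arr n T (A.1 + 1) (C.1 - 1)).1, 2 + (acgtA arr n T (A.1 + 1) (C.1 - 1)).2)
        else (T, 0)) with hR1
      set R2 := (if A.2 < C.2 ∧ A.2 ≠ -1 ∧ C.2 ≠ -1 then
          ((acgtA arr n R1.1 (A.2 + 1) (C.2 - 1)).1, 2 + (acgtA arr n R1.1 (A.2 + 1) (C.2 - 1)).2)
        else (R1.1, 0)) with hR2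
      set LP := List.foldl
          (fun (st : List (List Int) × Int) i =>
            ((acgtA arr n (acgtA arr n st.1 s i).1 (i + 1) e).1,
              if st.2 < (acgtA arr n st.1 s i).2 + (acgtA arr n (acgtA arr n st.1 s i).1 (i + 1) e).2 then
                (acgtA arr n st.1 s i).2 + (acgtA arr n (acgtA arr n st.1 s i).1 (i + 1) e).2
              else st.2))
          (R2.1, 0) (PySem.List.pyRange s e 1) with hLP
      have hr1v : R1.2 = (if A.1 < C.1 ∧ A.1 ≠ -1 ∧ C.1 ≠ -1 then
            2 + pvV arr A0 (A.1 + 1) (C.1 - 1) else 0) ∧ pvInv arr A0 R1.1 := by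
        rw [hR1]
        split_ifs with hg
        · obtain ⟨hgl, hg2, hg3⟩ := id hg
          rcases hag.1 with hb1 | hb1
          · exact absurd hb1 hg2
          rcases htc.1 with hb2 | hb2
          · exact absurd hb2 hg3
          have hu := ih (A.1 + 1) (C.1 - 1) T (by omega) (by omega) hInv
          exact ⟨by show 2 + (acgtA arr n T (A.1 + 1) (C.1 - 1)).2 = _; rw [hu.1], hu.2⟩
        · exact ⟨rfl, hInv⟩
      have hr2v : R2.2 = (if A.2 < C.2 ∧ A.2 ≠ -1 ∧ C.2 ≠ -1 then
            2 + pvV arr A0 (A.2 + 1) (C.2 - 1) else 0) ∧ pvInv arr A0 R2.1 := by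
        rw [hR2]
        split_ifs with hg
        · obtain ⟨hgl, hg2, hg3⟩ := id hg
          rcases hag.2 with hb1 | hb1
          · exact absurd hb1 hg2
          rcases htc.2 with hb2 | hb2
          · exact absurd hb2 hg3
          have hu := ih (A.2 + 1) (C.2 - 1) R1.1 (by omega) (by omega) hr1v.2
          exact ⟨by show 2 + (acgtA arr n R1.1 (A.2 + 1) (C.2 - 1)).2 = _; rw [hu.1], hu.2⟩
        · exact ⟨rfl, hr1v.2⟩
      have hlp := pvLoop_eq arr A0 n s e hs h2' (by omega) ih (PySem.List.pyRange s e 1)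
        (fun i hi => by rw [PySem.List.mem_pyRange_one] at hi; exact hi) R2.1 0 hr2v.2
      have hlpv : LP.2 = (PySem.List.pyRange s e 1).foldl
          (fun m i =>
            let t3 := pvV arr A0 s i + pvV arr A0 (i + 1) e
            if m < t3 then t3 else m) 0 := hlp.1
      have hlpInv : pvInv arr A0 LP.1 := hlp.2
      have hval : max (max LP.2 R1.2) R2.2 = pvV arr A0 s e := by
        rw [hlpv, hr1v.1, hr2v.1]
        conv_rhs => rw [pvV_rec arr A0 s e]
        unfold pvStep
        rw [if_neg h1, if_neg h2,
          if_neg (show ¬ pvMemoD A0 s e ≠ -1 from fun hc => hc hA0miss), ← hA, ← hC]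
      refine ⟨hval, ?_⟩
      rw [hval]
      exact pvInv_set2 arr A0 LP.1 s e hs he hlpInv hA0miss



-- ===== VERDICT (by name: the statement is the Claim_ definition above) =====
theorem acgt_spec : Claim_equal_acgt := by
  intro arr answer s e hdom hpre
  unfold Spec_acgt
  rw [pv_alt_eq_V arr answer s e]
  unfold acgt
  by_cases h1 : s ≥ e
  · rw [pvV_ge arr answer s e h1, acgtA, if_pos h1]
  by_cases h2 : e - s = 1
  · rw [pvV_one arr answer s e h2, acgtA, if_neg h1, if_pos h2]
  rcases hpre with h | h | h
  · omega
  · omega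
  · obtain ⟨h2', hs0, -, -, -⟩ := h
    exact (pvAcgtA_eq arr answer ((e - s).toNat + 1) s e answer (by omega) hs0
      (fun p q hp hq => Or.inl rfl)).1
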